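-- pv_equiv track=rewrite | github.com/gissuifeng/WeightedSpatiotemporalFlowCluster | WSTFP/mainFile.py | get_timeGap_for_oneCluster
-- ===== SOURCE A (Python) =====
-- def get_timeGap_for_oneCluster(one_cluster):
--     one_flow = one_cluster[0]
--     o_start_time, o_end_time, d_start_time, d_end_time = one_flow[1], one_flow[1], one_flow[3], one_flow[3]
--     for (fid, ot, oid, dt, did, num) in one_cluster[1:]:
--         if ot < o_start_time:
--             o_start_time = ot
--         if ot > o_end_time:
--             o_end_time = ot
--         if dt < d_start_time:
--             d_start_time = dt
--         if dt > d_end_time: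
--             d_end_time = dt
--     return o_start_time,o_end_time,d_start_time,d_end_time
-- ===== SOURCE B (Python) =====
-- def get_timeGap_for_oneCluster(one_cluster):
--     o_times = [f[1] for f in one_cluster]
--     d_times = [f[3] for f in one_cluster]
--     return min(o_times), max(o_times), min(d_times), max(d_times)
-- ===== Notes on version B (the rewrite author's own statement) =====
-- stated objective: simpler
-- what changed: Replaces the manual single-pass scan with explicit running state by projecting the origin/destination time columns and taking built-in min/max of each, returning the 4-tuple directly.
import Mathlib
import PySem

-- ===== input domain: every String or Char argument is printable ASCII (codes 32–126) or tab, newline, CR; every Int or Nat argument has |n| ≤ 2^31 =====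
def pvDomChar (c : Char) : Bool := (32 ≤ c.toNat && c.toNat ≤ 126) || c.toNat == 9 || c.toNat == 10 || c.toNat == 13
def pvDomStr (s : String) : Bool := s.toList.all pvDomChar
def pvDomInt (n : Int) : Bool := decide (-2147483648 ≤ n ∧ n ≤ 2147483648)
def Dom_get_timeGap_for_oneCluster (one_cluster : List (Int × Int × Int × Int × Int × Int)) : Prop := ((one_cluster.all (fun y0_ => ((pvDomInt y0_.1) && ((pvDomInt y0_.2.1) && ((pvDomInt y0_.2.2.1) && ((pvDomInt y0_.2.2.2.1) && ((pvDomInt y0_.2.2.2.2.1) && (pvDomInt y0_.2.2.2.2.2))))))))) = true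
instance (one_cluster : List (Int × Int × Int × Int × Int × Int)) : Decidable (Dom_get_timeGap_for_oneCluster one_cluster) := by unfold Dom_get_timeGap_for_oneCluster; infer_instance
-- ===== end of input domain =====

-- B replaces A's single interleaved running-min/max scan with column projections reduced by built-in min/max (simpler decomposition); Pre_ excludes the empty cluster, on which both programs raise.


-- ===== PORT A =====
-- one_cluster[0] raises IndexError on []; that input is excluded by Pre_ below, so the
-- [] branch returns a dummy value never claimed about.
def get_timeGap_for_oneCluster (one_cluster : List (Int × Int × Int × Int × Int × Int)) : Int × Int × Int × Int :=
  match one_cluster with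
  | [] => (0, 0, 0, 0)
  | one_flow :: rest =>
    rest.foldl
      (fun (st : Int × Int × Int × Int) f =>
        let ot := f.2.1
        let dt := f.2.2.2.1
        let o_start := if ot < st.1 then ot else st.1
        let o_end := if ot > st.2.1 then ot else st.2.1
        let d_start := if dt < st.2.2.1 then dt else st.2.2.1
        let d_end := if dt > st.2.2.2 then dt else st.2.2.2
        (o_start, o_end, d_start, d_end))
      (one_flow.2.1, one_flow.2.1, one_flow.2.2.2.1, one_flow.2.2.2.1)

-- ===== PORT B =====
-- min/max on [] raise ValueError in Python (excluded by Pre_); the none branch returns a dummy.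
def get_timeGap_for_oneCluster_alt (one_cluster : List (Int × Int × Int × Int × Int × Int)) : Int × Int × Int × Int :=
  let o_times := one_cluster.map (fun f => f.2.1)
  let d_times := one_cluster.map (fun f => f.2.2.2.1)
  match PySem.List.min? o_times (fun x => x), PySem.List.max? o_times (fun x => x),
        PySem.List.min? d_times (fun x => x), PySem.List.max? d_times (fun x => x) with
  | some a, some b, some c, some d => (a, b, c, d)
  | _, _, _, _ => (0, 0, 0, 0)

-- ===== PRECONDITION & SPEC =====
-- Pre_ excludes the empty list, on which A raises IndexError (and B raises ValueError).
def Pre_get_timeGap_for_oneCluster (one_cluster : List (Int × Int × Int × Int × Int × Int)) : Prop := one_cluster ≠ []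
instance (one_cluster : List (Int × Int × Int × Int × Int × Int)) : Decidable (Pre_get_timeGap_for_oneCluster one_cluster) := by unfold Pre_get_timeGap_for_oneCluster; infer_instance
def pvWitness_get_timeGap_for_oneCluster : (List (Int × Int × Int × Int × Int × Int)) := [(1, 2, 3, 4, 5, 6), (7, -1, 0, 9, 2, 3)]
def Spec_get_timeGap_for_oneCluster (one_cluster : List (Int × Int × Int × Int × Int × Int)) (out : Int × Int × Int × Int) : Prop := out = get_timeGap_for_oneCluster_alt one_cluster
instance (one_cluster : List (Int × Int × Int × Int × Int × Int)) (out : Int × Int × Int × Int) : Decidable (Spec_get_timeGap_for_oneCluster one_cluster out) := by unfold Spec_get_timeGap_for_oneCluster; infer_instance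

-- ===== CLAIM (what is proved, stated in full; the proofs are below) =====
def Claim_equal_get_timeGap_for_oneCluster : Prop := ∀ (one_cluster : List (Int × Int × Int × Int × Int × Int)), Dom_get_timeGap_for_oneCluster one_cluster → Pre_get_timeGap_for_oneCluster one_cluster → Spec_get_timeGap_for_oneCluster one_cluster (get_timeGap_for_oneCluster one_cluster)

-- ===== LEMMAS AND PROOFS =====

-- A's fold splits into four independent componentwise folds.
theorem fold_split (rest : List (Int × Int × Int × Int × Int × Int)) (a b c d : Int) :
    rest.foldl
      (fun (st : Int × Int × Int × Int) f =>
        let ot := f.2.1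
        let dt := f.2.2.2.1
        let o_start := if ot < st.1 then ot else st.1
        let o_end := if ot > st.2.1 then ot else st.2.1
        let d_start := if dt < st.2.2.1 then dt else st.2.2.1
        let d_end := if dt > st.2.2.2 then dt else st.2.2.2
        (o_start, o_end, d_start, d_end))
      (a, b, c, d)
    = ((rest.map (fun f => f.2.1)).foldl min a,
       (rest.map (fun f => f.2.1)).foldl max b,
       (rest.map (fun f => f.2.2.2.1)).foldl min c,
       (rest.map (fun f => f.2.2.2.1)).foldl max d) := by
  induction rest generalizing a b c d with
  | nil => rfl
  | cons f t ih =>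
    simp only [List.foldl_cons, List.map_cons]
    rw [ih]
    have e1 : (if f.2.1 < a then f.2.1 else a) = min a f.2.1 := by
      rw [min_def]; split_ifs <;> omega
    have e2 : (if f.2.1 > b then f.2.1 else b) = max b f.2.1 := by
      rw [max_def]; split_ifs <;> omega
    have e3 : (if f.2.2.2.1 < c then f.2.2.2.1 else c) = min c f.2.2.2.1 := by
      rw [min_def]; split_ifs <;> omega
    have e4 : (if f.2.2.2.1 > d then f.2.2.2.1 else d) = max d f.2.2.2.1 := by
      rw [max_def]; split_ifs <;> omega
    rw [e1, e2, e3, e4]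

theorem get_timeGap_for_oneCluster_spec_aux (one_cluster : List (Int × Int × Int × Int × Int × Int))
    (h : one_cluster ≠ []) :
    get_timeGap_for_oneCluster one_cluster = get_timeGap_for_oneCluster_alt one_cluster := by
  match one_cluster with
  | [] => exact absurd rfl h
  | f :: rest =>
    simp only [get_timeGap_for_oneCluster, get_timeGap_for_oneCluster_alt, List.map_cons,
      PySem.List.min?_id_cons, PySem.List.max?_id_cons]
    exact fold_split rest _ _ _ _

-- ===== VERDICT (by name: the statement is the Claim_ definition above) =====
theorem get_timeGap_for_oneCluster_spec : Claim_equal_get_timeGap_for_oneCluster := by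
  intro xs _ hpre
  exact (get_timeGap_for_oneCluster_spec_aux xs hpre).symm ▸ rfl
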